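-- pv_equiv track=rewrite | github.com/ChangChuntao/FAST | fast/qc/noise.py | culHighOrderDiff
-- ===== SOURCE A (Python) =====
-- def culHighOrderDiff(epochOrderData):
--     diffCount = len(epochOrderData)
--     backDiff = epochOrderData
--     while diffCount > 1:
--         updateDiff = []
--         for diffIndex in range(len(backDiff) - 1, 0, -1):
--             updateDiff.append(backDiff[diffIndex] - backDiff[diffIndex-1])
--         backDiff = updateDiff[::-1]
--         diffCount += -1
--     return backDiff[0]
-- ===== SOURCE B (Python) =====
-- def culHighOrderDiff(epochOrderData):
--     # Closed form: (n-1)th finite difference = sum_k (-1)^k C(n-1,k) * data[n-1-k],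
--     # with the signed binomial coefficient updated incrementally (exact integer division).
--     n = len(epochOrderData)
--     total = 0
--     coeff = 1
--     for k in range(n):
--         total += coeff * epochOrderData[n - 1 - k]
--         coeff = coeff * (k - (n - 1)) // (k + 1)
--     return total
-- ===== Notes on version B (the rewrite author's own statement) =====
-- stated objective: faster
-- what changed: A iteratively builds n-1 successive finite-difference lists (a quadratic cascade with backwards index arithmetic and reversal); B evaluates the closed-form alternating binomial sum sum_k (-1)^k*C(n-1,k)*data[n-1-k] in one pass, updating the signed coefficient by exact integer division.
import Mathlib
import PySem

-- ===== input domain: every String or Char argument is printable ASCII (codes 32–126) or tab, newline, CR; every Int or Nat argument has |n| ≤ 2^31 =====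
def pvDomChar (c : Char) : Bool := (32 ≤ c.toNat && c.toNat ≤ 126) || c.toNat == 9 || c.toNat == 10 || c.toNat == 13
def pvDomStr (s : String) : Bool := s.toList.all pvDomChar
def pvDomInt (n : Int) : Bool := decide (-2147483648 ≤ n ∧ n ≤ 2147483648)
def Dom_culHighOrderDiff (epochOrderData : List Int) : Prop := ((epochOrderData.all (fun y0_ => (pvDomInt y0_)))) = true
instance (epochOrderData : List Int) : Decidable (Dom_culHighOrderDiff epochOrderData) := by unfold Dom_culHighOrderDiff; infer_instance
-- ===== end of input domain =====

-- B replaces A's O(n^2) cascade of difference levels by the closed-form alternating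
-- binomial sum sum_k (-1)^k C(n-1,k) * data[n-1-k], exact over integers (alternative/faster decomposition).

-- ===== PORT A =====
-- one pass of A's inner for-loop (range(len-1, 0, -1), append, then updateDiff[::-1])
def aStep (backDiff : List Int) : List Int :=
  (PySem.List.slice? ((PySem.List.pyRange ((backDiff.length : Int) - 1) 0 (-1)).foldl
      (fun updateDiff diffIndex =>
        updateDiff ++ [PySem.List.pyGetD backDiff diffIndex 0 -
                       PySem.List.pyGetD backDiff (diffIndex - 1) 0]) []) none none (-1)).getD []

-- A's while-loop: `while diffCount > 1: backDiff = step(backDiff); diffCount += -1`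
def aLoop (diffCount : Int) (backDiff : List Int) : List Int :=
  if 1 < diffCount then aLoop (diffCount + (-1)) (aStep backDiff) else backDiff
termination_by diffCount.toNat
decreasing_by omega

def culHighOrderDiff (epochOrderData : List Int) : Int :=
  PySem.List.pyGetD (aLoop (epochOrderData.length : Int) epochOrderData) 0 0

-- ===== PORT B =====
-- for k in range(n): total += coeff * data[n-1-k]; coeff = coeff*(k-(n-1)) // (k+1)
def culHighOrderDiff_alt (epochOrderData : List Int) : Int :=
  ((PySem.List.pyRange 0 (epochOrderData.length : Int) 1).foldl
    (fun (st : Int × Int) k =>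
      (st.1 + st.2 * PySem.List.pyGetD epochOrderData ((epochOrderData.length : Int) - 1 - k) 0,
       PySem.Int.floordiv (st.2 * (k - ((epochOrderData.length : Int) - 1))) (k + 1)))
    (0, 1)).1

-- ===== PRECONDITION & SPEC =====
-- Pre_ excludes only the empty list, on which A raises IndexError.
def Pre_culHighOrderDiff (epochOrderData : List Int) : Prop := epochOrderData ≠ []
instance (epochOrderData : List Int) : Decidable (Pre_culHighOrderDiff epochOrderData) := by unfold Pre_culHighOrderDiff; infer_instance
def pvWitness_culHighOrderDiff : List Int := ([1, 3, 7])

def Spec_culHighOrderDiff (epochOrderData : List Int) (out : Int) : Prop := out = culHighOrderDiff_alt epochOrderData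
instance (epochOrderData : List Int) (out : Int) : Decidable (Spec_culHighOrderDiff epochOrderData out) := by unfold Spec_culHighOrderDiff; infer_instance

-- ===== CLAIM (what is proved, stated in full; the proofs are below) =====
def Claim_equal_culHighOrderDiff : Prop := ∀ (epochOrderData : List Int), Dom_culHighOrderDiff epochOrderData → Pre_culHighOrderDiff epochOrderData → Spec_culHighOrderDiff epochOrderData (culHighOrderDiff epochOrderData)

-- ===== LEMMAS AND PROOFS =====

-- signed binomial coefficient (-1)^k * C(m,k)
def sc (m k : Nat) : Int := (-1) ^ k * (m.choose k : Int)

-- the common value both programs compute: sum_k sc (n-1) k * l[n-1-k]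
def S (l : List Int) : Int :=
  ∑ k ∈ Finset.range l.length, sc (l.length - 1) k * l.getD (l.length - 1 - k) 0

-- forward-difference list, proof-side form
def dl (l : List Int) : List Int :=
  (List.range (l.length - 1)).map (fun i => l.getD (i + 1) 0 - l.getD i 0)

lemma length_dl (l : List Int) : (dl l).length = l.length - 1 := by simp [dl]

lemma pyRange_neg_one (m : Nat) :
    PySem.List.pyRange (m : Int) 0 (-1) = (List.range m).map (fun k : Nat => (m : Int) - k) := by
  simp only [PySem.List.pyRange]
  norm_num
  rw [show (if 0 < m then m else 0) = m by split_ifs <;> omega]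
  exact List.map_congr_left fun k _ => by ring

-- one pass of A's cascade builds exactly the forward-difference list
lemma aStep_eq_dl (l : List Int) : aStep l = dl l := by
  unfold aStep
  rw [PySem.List.foldl_append_singleton_eq_map, PySem.List.slice?_none_none_neg_one]
  simp only [Option.getD_some, List.nil_append]
  cases l with
  | nil => simp [PySem.List.pyRange, dl]
  | cons x t =>
    have hcast : (((x :: t).length : Int)) - 1 = (t.length : Int) := by simp
    rw [hcast, pyRange_neg_one t.length, List.map_map]
    apply List.ext_getElem
    · simp [length_dl]
    · intro k hk1 hk2
      have hkm : k < t.length := by simpa using hk1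
      rw [List.getElem_reverse]
      simp only [List.length_map, List.length_range, List.getElem_map, List.getElem_range,
        Function.comp]
      have e1 : (t.length : Int) - ↑(t.length - 1 - k) = ((k + 1 : Nat) : Int) := by omega
      have e2 : ((k + 1 : Nat) : Int) - 1 = ((k : Nat) : Int) := by omega
      rw [e1, e2]
      have hlen : (dl (x :: t)).length = t.length := by simp [length_dl]
      have hk2' : k < t.length := by omega
      simp only [dl, List.length_cons, Nat.add_sub_cancel, List.getElem_map, List.getElem_range]
      rw [PySem.List.pyGetD_natCast, PySem.List.pyGetD_natCast]

-- the Pascal step: sum_{k<m} sc (m-1) k * (a k - a (k+1)) = sum_{j<m+1} sc m j * a j  (1 ≤ m)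
lemma pascal_sum (m : Nat) (hm : 1 ≤ m) (a : Nat → Int) :
    ∑ k ∈ Finset.range m, sc (m - 1) k * (a k - a (k + 1)) =
      ∑ j ∈ Finset.range (m + 1), sc m j * a j := by
  obtain ⟨M, rfl⟩ : ∃ M, m = M + 1 := ⟨m - 1, by omega⟩
  simp only [Nat.add_sub_cancel]
  have hsc : ∀ j, sc (M + 1) (j + 1) = sc M (j + 1) - sc M j := by
    intro j
    simp only [sc, Nat.choose_succ_succ, pow_succ]
    push_cast
    ring
  have htop : sc M (M + 1) = 0 := by simp [sc]
  have h1 : ∑ k ∈ Finset.range (M + 1), sc M k * (a k - a (k + 1)) =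
      (∑ k ∈ Finset.range (M + 1), sc M k * a k) -
      (∑ k ∈ Finset.range (M + 1), sc M k * a (k + 1)) := by
    rw [← Finset.sum_sub_distrib]
    exact Finset.sum_congr rfl fun k _ => by ring
  rw [h1, Finset.sum_range_succ' (fun j => sc (M + 1) j * a j) (M + 1),
      Finset.sum_range_succ' (fun k => sc M k * a k) M]
  have h2 : ∑ k ∈ Finset.range M, sc M (k + 1) * a (k + 1) =
      (∑ k ∈ Finset.range (M + 1), sc M (k + 1) * a (k + 1)) := by
    rw [Finset.sum_range_succ, htop]; ring
  rw [h2]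
  have h0 : sc (M + 1) 0 = 1 := by simp [sc]
  have h00 : sc M 0 = 1 := by simp [sc]
  rw [h0, h00]
  have h3 : ∑ k ∈ Finset.range (M + 1), sc (M + 1) (k + 1) * a (k + 1) =
      ∑ k ∈ Finset.range (M + 1), (sc M (k + 1) * a (k + 1) - sc M k * a (k + 1)) :=
    Finset.sum_congr rfl fun k _ => by rw [hsc]; ring
  rw [h3, Finset.sum_sub_distrib]
  ring

-- differencing preserves S
lemma S_dl (l : List Int) (h : 2 ≤ l.length) : S (dl l) = S l := by
  set n := l.length with hn
  set m := n - 1 with hm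
  have hdlen : (dl l).length = m := length_dl l
  have hS : S (dl l) = ∑ k ∈ Finset.range m,
      sc (m - 1) k * ((l.getD (m - k) 0) - l.getD (m - (k + 1)) 0) := by
    unfold S
    rw [hdlen]
    refine Finset.sum_congr rfl fun k hk => ?_
    have hk' : k < m := Finset.mem_range.mp hk
    have hidx : m - 1 - k < (List.range (l.length - 1)).length := by simp; omega
    have hg : (dl l).getD (m - 1 - k) 0 = l.getD (m - 1 - k + 1) 0 - l.getD (m - 1 - k) 0 := by
      simp only [dl]
      rw [List.getD_eq_getElem _ _ (by simpa using hidx), List.getElem_map, List.getElem_range]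
    rw [hg, show m - 1 - k + 1 = m - k by omega, show m - 1 - k = m - (k + 1) by omega]
  rw [hS, pascal_sum m (by omega) (fun j => l.getD (m - j) 0)]
  unfold S
  rw [show l.length = m + 1 by omega]
  simp only [Nat.add_sub_cancel]

-- A's loop: head of the iterated cascade is S
lemma aLoop_S (n : Nat) : ∀ l : List Int, l.length = n → l ≠ [] →
    PySem.List.pyGetD (aLoop (l.length : Int) l) 0 0 = S l := by
  induction n using Nat.strong_induction_on with
  | _ n ih =>
    intro l hlen hne
    by_cases h1 : l.length ≤ 1
    · have h1' : l.length = 1 := by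
        cases l with | nil => simp at hne | cons x t => simp at h1 ⊢; omega
      obtain ⟨x, hx⟩ : ∃ x, l = [x] := by
        cases l with
        | nil => simp at hne
        | cons x t =>
          refine ⟨x, ?_⟩
          cases t with
          | nil => rfl
          | cons y u => simp at h1'
      subst hx
      rw [aLoop, if_neg (by omega)]
      unfold S
      simp [sc, PySem.List.pyGetD, PySem.List.pyGet?, PySem.List.pyIdx?]
    · have h2 : 2 ≤ l.length := by omega
      have hdlen : (dl l).length = l.length - 1 := length_dl l
      have hdne : dl l ≠ [] := by
        intro hc
        have := length_dl l
        rw [hc] at this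
        simp at this
        omega
      have hidx : (l.length : Int) + (-1) = ((dl l).length : Int) := by rw [hdlen]; omega
      rw [aLoop, if_pos (by omega : (1 : Int) < (l.length : Int)), aStep_eq_dl, hidx,
        ih (dl l).length (by omega) (dl l) rfl hdne, S_dl l h2]

-- the exact-division coefficient update
lemma coeff_step (m j : Nat) (hj : j ≤ m) :
    PySem.Int.floordiv (sc m j * ((j : Int) - (m : Int))) ((j : Int) + 1) = sc m (j + 1) := by
  have hnum : sc m j * ((j : Int) - (m : Int)) = sc m (j + 1) * ((j : Int) + 1) := by
    have hch : (m.choose (j + 1) : Int) * ((j : Int) + 1) = (m.choose j : Int) * ((m : Int) - j) := by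
      have h2 := Nat.choose_succ_right_eq m j
      have h3 : ((m.choose (j + 1) * (j + 1) : Nat) : Int) = ((m.choose j * (m - j) : Nat) : Int) := by
        exact_mod_cast congrArg (Nat.cast : Nat → Int) h2
      push_cast [hj] at h3
      exact h3
    simp only [sc, pow_succ]
    rw [show (-1 : Int) ^ j * (m.choose j : Int) * ((j : Int) - (m : Int)) =
        (-1 : Int) ^ j * -1 * ((m.choose j : Int) * ((m : Int) - (j : Int))) by ring, ← hch]
    ring
  rw [hnum, PySem.Int.floordiv_eq_ediv_of_pos (by omega : (0:Int) < (j : Int) + 1),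
    Int.mul_ediv_cancel _ (by omega : ((j : Int) + 1) ≠ 0)]

-- B's fold invariant: state after j steps is (partial sum, sc (n-1) j)
lemma bfold_inv (l : List Int) (j : Nat) (hj : j ≤ l.length) :
    (List.range j).foldl
      (fun (st : Int × Int) (k : Nat) =>
        (st.1 + st.2 * PySem.List.pyGetD l ((l.length : Int) - 1 - (k : Int)) 0,
         PySem.Int.floordiv (st.2 * ((k : Int) - ((l.length : Int) - 1))) ((k : Int) + 1)))
      (0, 1) =
    (∑ k ∈ Finset.range j, sc (l.length - 1) k * l.getD (l.length - 1 - k) 0,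
     sc (l.length - 1) j) := by
  induction j with
  | zero => simp [sc]
  | succ j ihj =>
    have hj' : j ≤ l.length := by omega
    rw [List.range_succ, List.foldl_append, ihj hj', List.foldl_cons, List.foldl_nil,
      Finset.sum_range_succ]
    have hidx : (l.length : Int) - 1 - (j : Int) = ((l.length - 1 - j : Nat) : Int) := by omega
    have hget : PySem.List.pyGetD l ((l.length : Int) - 1 - (j : Int)) 0 =
        l.getD (l.length - 1 - j) 0 := by rw [hidx, PySem.List.pyGetD_natCast]
    have hcoeff : PySem.Int.floordiv (sc (l.length - 1) j * ((j : Int) - ((l.length : Int) - 1)))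
        ((j : Int) + 1) = sc (l.length - 1) (j + 1) := by
      have hm : ((l.length - 1 : Nat) : Int) = (l.length : Int) - 1 := by omega
      rw [← hm]
      exact coeff_step (l.length - 1) j (by omega)
    rw [hget, hcoeff]

lemma alt_eq_S (l : List Int) : culHighOrderDiff_alt l = S l := by
  unfold culHighOrderDiff_alt
  rw [PySem.List.pyRange_zero_natCast, List.foldl_map, bfold_inv l l.length le_rfl]
  rfl

-- ===== VERDICT (by name: the statement is the Claim_ definition above) =====
theorem culHighOrderDiff_spec : Claim_equal_culHighOrderDiff := by
  intro l _ hpre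
  unfold Spec_culHighOrderDiff culHighOrderDiff
  rw [alt_eq_S, aLoop_S l.length l rfl hpre]
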